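-- pv_equiv track=rewrite | github.com/ALS15204/advent_of_code | aoc_2023/day_12/hot_spring.py | count_broken_spring_groups
-- ===== SOURCE A (Python) =====
-- from typing import List
--
-- BROKEN = "#"
--
-- def count_broken_spring_groups(spring_line: str) -> List[int]:
--     broken_spring_groups = []
--     current_group = 0
--     for spring in spring_line:
--         if spring == BROKEN:
--             current_group += 1
--         elif current_group > 0:
--             broken_spring_groups.append(current_group)
--             current_group = 0
--     if current_group > 0:
--         broken_spring_groups.append(current_group)
--     return broken_spring_groups
-- ===== SOURCE B (Python) =====
-- import re
-- from typing import List
--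
-- BROKEN = "#"
--
-- def count_broken_spring_groups(spring_line: str) -> List[int]:
--     return [len(run) for run in re.findall(BROKEN + "+", spring_line)]
-- ===== Notes on version B (the rewrite author's own statement) =====
-- stated objective: idiomatic
-- what changed: Replaced the manual accumulator loop (current_group tracking and flushing) with a regex findall scan that extracts each maximal run of broken springs and a comprehension mapping runs to lengths.
import Mathlib
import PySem

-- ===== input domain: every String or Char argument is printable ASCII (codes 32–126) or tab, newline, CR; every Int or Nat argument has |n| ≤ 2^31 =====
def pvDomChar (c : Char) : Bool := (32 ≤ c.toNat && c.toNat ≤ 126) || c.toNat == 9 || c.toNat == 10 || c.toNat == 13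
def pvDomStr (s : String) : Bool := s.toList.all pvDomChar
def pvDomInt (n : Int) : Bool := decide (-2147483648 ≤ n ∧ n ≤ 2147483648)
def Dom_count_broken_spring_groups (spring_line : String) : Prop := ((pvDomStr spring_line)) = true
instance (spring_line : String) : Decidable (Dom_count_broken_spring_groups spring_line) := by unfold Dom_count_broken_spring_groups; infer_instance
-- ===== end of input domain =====

-- B replaces A's accumulator loop by a regex scan (re.findall("#+")) mapped to run lengths: idiomatic, same cost.

-- ===== PORT A =====
-- A's for-loop over the characters with state (broken_spring_groups, current_group),
-- plus the final flush of current_group.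
def pvGoA : List Char → List Int → Int → List Int
  | [], broken_spring_groups, current_group =>
      if current_group > 0 then broken_spring_groups ++ [current_group] else broken_spring_groups
  | spring :: rest, broken_spring_groups, current_group =>
      if spring = '#' then pvGoA rest broken_spring_groups (current_group + 1)
      else if current_group > 0 then pvGoA rest (broken_spring_groups ++ [current_group]) 0
      else pvGoA rest broken_spring_groups current_group

def count_broken_spring_groups (spring_line : String) : List Int :=
  pvGoA spring_line.toList [] 0

-- ===== PORT B =====
-- re.findall("#+", s): the maximal nonempty runs of '#' = the nonempty chunks obtained by
-- splitting at every non-'#' character (exact for this one-character-class pattern).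
def pvFindallHashRuns (l : List Char) : List (List Char) :=
  (l.splitOnP (fun c => c ≠ '#')).filter (fun run => run ≠ [])

def count_broken_spring_groups_alt (spring_line : String) : List Int :=
  (pvFindallHashRuns spring_line.toList).map (fun run => (run.length : Int))

-- ===== PRECONDITION & SPEC =====
def Spec_count_broken_spring_groups (spring_line : String) (out : List Int) : Prop := out = count_broken_spring_groups_alt spring_line
instance (spring_line : String) (out : List Int) : Decidable (Spec_count_broken_spring_groups spring_line out) := by unfold Spec_count_broken_spring_groups; infer_instance

-- ===== CLAIM (what is proved, stated in full; the proofs are below) =====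
def Claim_equal_count_broken_spring_groups : Prop := ∀ (spring_line : String), Dom_count_broken_spring_groups spring_line → Spec_count_broken_spring_groups spring_line (count_broken_spring_groups spring_line)

-- ===== LEMMAS AND PROOFS =====

def pvAltL (l : List Char) : List Int :=
  (pvFindallHashRuns l).map (fun run => (run.length : Int))

theorem pvGoA_acc (l : List Char) : ∀ (acc : List Int) (cur : Int),
    pvGoA l acc cur = acc ++ pvGoA l [] cur := by
  induction l with
  | nil => intro acc cur; simp [pvGoA]; split <;> simp
  | cons c rest ih =>
      intro acc cur
      simp only [pvGoA]
      split_ifs with h1 h2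
      · rw [ih acc, ih []]
      · rw [ih (acc ++ [cur]), ih ([] ++ [cur])]; simp
      · rw [ih acc, ih []]

theorem pv_split_replicate (n : Nat) :
    List.splitOnP (fun c => c ≠ '#') (List.replicate n '#') = [List.replicate n '#'] := by
  induction n with
  | zero => simp [List.splitOnP_nil]
  | succ n ih =>
      rw [List.replicate_succ, List.splitOnP_cons]
      simp only [ne_eq, decide_not] at ih ⊢
      rw [if_neg (by simp), ih]
      simp

theorem pv_split_replicate_cons (n : Nat) (c : Char) (hc : c ≠ '#') (l : List Char) :
    List.splitOnP (fun c => c ≠ '#') (List.replicate n '#' ++ c :: l) =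
      List.replicate n '#' :: List.splitOnP (fun c => c ≠ '#') l := by
  induction n with
  | zero => simp [List.splitOnP_cons, hc]
  | succ n ih =>
      rw [List.replicate_succ, List.cons_append, List.splitOnP_cons]
      simp only [ne_eq, decide_not] at ih ⊢
      rw [if_neg (by simp), ih]
      simp

theorem pvMain (l : List Char) : ∀ (n : Nat),
    pvGoA l [] (n : Int) = pvAltL (List.replicate n '#' ++ l) := by
  induction l with
  | nil =>
      intro n
      simp only [pvGoA, List.append_nil, pvAltL, pvFindallHashRuns, pv_split_replicate]
      rcases Nat.eq_zero_or_pos n with h | h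
      · subst h; simp
      · have hlt : (0 : Int) < (n : Int) := by exact_mod_cast h
        have hne : List.replicate n '#' ≠ [] := by
          simp [List.replicate_eq_nil_iff]; omega
        simp [hne]
        omega
  | cons c rest ih =>
      intro n
      by_cases hc : c = '#'
      · subst hc
        simp only [pvGoA]
        have h1 : ((n : Int) + 1) = ((n + 1 : Nat) : Int) := by push_cast; ring
        rw [h1, ih (n + 1)]
        rw [List.replicate_succ', List.append_assoc]
        rfl
      · have hsplit := pv_split_replicate_cons n c hc rest
        have hrhs : pvAltL (List.replicate n '#' ++ c :: rest) =
            (if 0 < n then [(n : Int)] else []) ++ pvAltL rest := by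
          simp only [pvAltL, pvFindallHashRuns, hsplit, List.filter_cons]
          rcases Nat.eq_zero_or_pos n with h | h
          · subst h; simp
          · have hne : List.replicate n '#' ≠ [] := by
              simp [List.replicate_eq_nil_iff]; omega
            simp [hne, h]
        rw [hrhs]
        simp only [pvGoA, if_neg hc]
        rcases Nat.eq_zero_or_pos n with h | h
        · subst h
          simpa using ih 0
        · have hni : (0 : Int) < (n : Int) := by exact_mod_cast h
          rw [if_pos hni, pvGoA_acc, if_pos h]
          have := ih 0
          simp only [Nat.cast_zero, List.replicate_zero, List.nil_append] at this
          rw [this]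
          simp

-- ===== VERDICT (by name: the statement is the Claim_ definition above) =====
theorem count_broken_spring_groups_spec : Claim_equal_count_broken_spring_groups := by
  intro s _
  unfold Spec_count_broken_spring_groups count_broken_spring_groups count_broken_spring_groups_alt
  have := pvMain s.toList 0
  simpa [pvAltL] using this
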